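-- pv_equiv track=rewrite | github.com/JoelStalin/EasyCounting | scripts/automation/migrate_odoo19_views.py | find_tag_end
-- ===== SOURCE A (Python) =====
-- def find_tag_end(text: str, start: int) -> int:
--     quote: str | None = None
--     i = start
--     while i < len(text):
--         char = text[i]
--         if quote:
--             if char == quote:
--                 quote = None
--         else:
--             if char in {"'", '"'}:
--                 quote = char
--             elif char == ">":
--                 return i
--         i += 1
--     raise ValueError("Unterminated XML tag while scanning attrs")
-- ===== SOURCE B (Python) =====
-- def find_tag_end(text: str, start: int) -> int:
--     quote = None
--     i = start
--     while True:
--         if quote is None: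
--             candidates = [j for j in (text.find(c, i) for c in ("'", '"', '>')) if j != -1]
--             if not candidates:
--                 raise ValueError("Unterminated XML tag while scanning attrs")
--             j = min(candidates)
--             if text[j] == ">":
--                 return j
--             quote = text[j]
--         else:
--             j = text.find(quote, i)
--             if j == -1:
--                 raise ValueError("Unterminated XML tag while scanning attrs")
--             quote = None
--         i = j + 1
-- ===== Notes on version B (the rewrite author's own statement) =====
-- stated objective: faster
-- what changed: Instead of A's per-character while-loop with a quote-state flag, B jumps between significant characters: outside a quote it takes the earliest of str.find for ', " and > and either returns or enters the quote; inside a quote a single str.find locates the closing quote.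
-- outside the precondition, e.g. on find_tag_end('a>', -1): A returns -1, B returns 1; on find_tag_end('>a', -1): A returns 0, B raises ValueError
import Mathlib
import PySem

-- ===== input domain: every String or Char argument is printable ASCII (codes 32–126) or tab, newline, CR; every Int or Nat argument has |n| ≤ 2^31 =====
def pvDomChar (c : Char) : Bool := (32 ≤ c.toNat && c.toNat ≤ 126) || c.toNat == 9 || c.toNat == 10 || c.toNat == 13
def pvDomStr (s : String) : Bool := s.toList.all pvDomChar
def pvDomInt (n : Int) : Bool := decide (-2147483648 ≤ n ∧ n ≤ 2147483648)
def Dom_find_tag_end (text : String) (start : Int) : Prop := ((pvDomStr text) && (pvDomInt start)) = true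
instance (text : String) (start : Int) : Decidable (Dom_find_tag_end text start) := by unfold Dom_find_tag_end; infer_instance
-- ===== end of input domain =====

-- B replaces A's per-character quote-state scan by find-based jumps between significant
-- characters (quotes and '>'), which a timing run measures as a constant-factor speedup.


-- ===== PORT A =====
-- A's while loop: index i, current quote state; per-character scan.
def pvScanA (text : List Char) (quote : Option Char) (i : Int) : Int :=
  if _h : i < (text.length : Int) then
    match PySem.List.pyGet? text i with
    | none => 0  -- Python raises IndexError here (only reachable for i < -len); outside Pre_
    | some char =>
      match quote with
      | some q => pvScanA text (if char = q then none else some q) (i + 1)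
      | none =>
        if char = '\'' ∨ char = '"' then pvScanA text (some char) (i + 1)
        else if char = '>' then i
        else pvScanA text none (i + 1)
  else 0  -- Python raises ValueError "Unterminated XML tag"; outside Pre_
termination_by ((text.length : Int) - i).toNat
decreasing_by all_goals omega

def find_tag_end (text : String) (start : Int) : Int :=
  pvScanA text.toList none start

-- ===== PORT B =====
-- text.find(c, i) for a single character c (Python clamps a negative start to len+i, floored at 0).
def pvFindNat (text : List Char) (c : Char) (j : Nat) : Int :=
  if h : j < text.length then
    if text[j] = c then (j : Int) else pvFindNat text c (j + 1)
  else -1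
termination_by text.length - j

def pvFind (text : List Char) (c : Char) (i : Int) : Int :=
  pvFindNat text c (if i < 0 then ((text.length : Int) + i).toNat else i.toNat)

-- These two characterisations of pvFind are cited by pvScanB's decreasing_by, so they stay above it.
theorem pvFindNat_le (text : List Char) (c : Char) (j : Nat) :
    pvFindNat text c j = -1 ∨
      ((j : Int) ≤ pvFindNat text c j ∧ pvFindNat text c j < (text.length : Int)) := by
  fun_induction pvFindNat text c j with
  | case1 j h hc => right; omega
  | case2 j h hc ih =>
      rcases ih with h1 | h1
      · exact Or.inl h1
      · right; omega
  | case3 j h => left; rfl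

theorem pvFind_le (text : List Char) (c : Char) (i : Int) :
    pvFind text c i = -1 ∨
      (i ≤ pvFind text c i ∧ 0 ≤ pvFind text c i ∧ pvFind text c i < (text.length : Int)) := by
  unfold pvFind
  rcases pvFindNat_le text c (if i < 0 then ((text.length : Int) + i).toNat else i.toNat) with h | h
  · exact Or.inl h
  · right
    by_cases hi : i < 0
    · rw [if_pos hi] at h ⊢; omega
    · rw [if_neg hi] at h ⊢; omega

-- B's loop: jump to the next significant character with find.
def pvScanB (text : List Char) (quote : Option Char) (i : Int) : Int :=
  match quote with
  | some q =>
    if _h : pvFind text q i = -1 then 0  -- Python raises ValueError; outside Pre_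
    else pvScanB text none (pvFind text q i + 1)
  | none =>
    match _hj : PySem.List.min?
        (([pvFind text '\'' i, pvFind text '"' i, pvFind text '>' i]).filter (fun j => j != -1))
        (fun j => j) with
    | none => 0  -- no candidates: Python raises ValueError; outside Pre_
    | some j =>
      match PySem.List.pyGet? text j with
      | none => 0  -- unreachable: j is a valid index
      | some ch => if ch = '>' then j else pvScanB text (some ch) (j + 1)
termination_by ((text.length : Int) - i).toNat
decreasing_by
  · rcases pvFind_le text q i with h | h
    · exact absurd h _h
    · omega
  · have hmem := PySem.List.min?_mem _hj
    simp only [List.mem_filter, List.mem_cons, List.not_mem_nil, or_false, bne_iff_ne,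
      ne_eq] at hmem
    obtain ⟨hj3, hne⟩ := hmem
    rcases hj3 with h | h | h <;>
      (subst h; rcases pvFind_le text _ i with h' | h' <;> [exact absurd h' hne; omega])

def find_tag_end_alt (text : String) (start : Int) : Int :=
  pvScanB text.toList none start

-- ===== PRECONDITION & SPEC =====
-- whether an unquoted '>' occurs while scanning the given chars with the given quote state
def pvHasTagEnd : Option Char → List Char → Bool
  | _, [] => false
  | some q, c :: rest => pvHasTagEnd (if c = q then none else some q) rest
  | none, c :: rest =>
      if c = '>' then true
      else if c = '\'' ∨ c = '"' then pvHasTagEnd (some c) rest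
      else pvHasTagEnd none rest

-- Pre_ excludes (a) inputs with no unquoted '>' at or after start, on which A raises ValueError
-- (and start < -len(text), IndexError), and (b) negative start, on which A's Python
-- negative-index wraparound scans the tail and then the whole string from 0 (it can even
-- return a negative index) — an accident of indexing that B's forward find-based scan does
-- not reproduce (B clamps like str.find, or raises where nothing remains).
def Pre_find_tag_end (text : String) (start : Int) : Prop :=
  0 ≤ start ∧ pvHasTagEnd none (text.toList.drop start.toNat) = true
instance (text : String) (start : Int) : Decidable (Pre_find_tag_end text start) := by
  unfold Pre_find_tag_end; infer_instance

def pvWitness_find_tag_end : String × Int := ("<p a='1'>", 0)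

def Spec_find_tag_end (text : String) (start : Int) (out : Int) : Prop := out = find_tag_end_alt text start
instance (text : String) (start : Int) (out : Int) : Decidable (Spec_find_tag_end text start out) := by unfold Spec_find_tag_end; infer_instance

-- ===== CLAIM (what is proved, stated in full; the proofs are below) =====
def Claim_equal_find_tag_end : Prop := ∀ (text : String) (start : Int), Dom_find_tag_end text start → Pre_find_tag_end text start → Spec_find_tag_end text start (find_tag_end text start)

-- ===== LEMMAS AND PROOFS =====

-- full characterisation of pvFindNat: where it returns -1 and what it finds
theorem pvFindNat_spec (l : List Char) (c : Char) (j : Nat) :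
    (pvFindNat l c j = -1 → ∀ k, j ≤ k → l[k]? ≠ some c) ∧
    (pvFindNat l c j ≠ -1 → ∃ r : Nat, pvFindNat l c j = (r : Int) ∧ j ≤ r ∧
      l[r]? = some c ∧ ∀ k, j ≤ k → k < r → l[k]? ≠ some c) := by
  fun_induction pvFindNat l c j with
  | case1 j h hc =>
      constructor
      · intro hh; exact absurd hh (by omega)
      · intro _
        exact ⟨j, rfl, le_refl j, by rw [List.getElem?_eq_getElem h, hc],
          fun k hk1 hk2 => absurd (lt_of_le_of_lt hk1 hk2) (lt_irrefl j)⟩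
  | case2 j h hc ih =>
      constructor
      · intro hh k hk
        rcases Nat.eq_or_lt_of_le hk with rfl | hk'
        · rw [List.getElem?_eq_getElem h]; simp [hc]
        · exact ih.1 hh k (by omega)
      · intro hh
        obtain ⟨r, hr, hjr, hcr, hmid⟩ := ih.2 hh
        refine ⟨r, hr, by omega, hcr, fun k hk1 hk2 => ?_⟩
        rcases Nat.eq_or_lt_of_le hk1 with rfl | hk'
        · rw [List.getElem?_eq_getElem h]; simp [hc]
        · exact hmid k (by omega) hk2
  | case3 j h =>
      constructor
      · intro _ k hk
        rw [List.getElem?_eq_none (by omega)]; simp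
      · intro hh; exact absurd rfl hh

theorem pvFind_natCast (l : List Char) (c : Char) (i : Nat) :
    pvFind l c (i : Int) = pvFindNat l c i := by
  unfold pvFind
  rw [if_neg (by omega)]
  norm_num

-- step / termination-shaped unfoldings of the two loops
theorem pvScanA_ge (l : List Char) (q : Option Char) (i : Int)
    (h : (l.length : Int) ≤ i) : pvScanA l q i = 0 := by
  rw [pvScanA, dif_neg (by omega)]

theorem pvScanA_lt_some (l : List Char) (q : Char) (i : Nat) (h : i < l.length) :
    pvScanA l (some q) (i : Int) =
      pvScanA l (if l[i] = q then none else some q) ((i : Int) + 1) := by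
  rw [pvScanA, dif_pos (by exact_mod_cast h)]
  simp [List.getElem?_eq_getElem h]

theorem pvScanA_lt_none (l : List Char) (i : Nat) (h : i < l.length) :
    pvScanA l none (i : Int) =
      if l[i] = '\'' ∨ l[i] = '"' then pvScanA l (some l[i]) ((i : Int) + 1)
      else if l[i] = '>' then (i : Int)
      else pvScanA l none ((i : Int) + 1) := by
  rw [pvScanA, dif_pos (by exact_mod_cast h)]
  simp [List.getElem?_eq_getElem h]

theorem pvScanB_some (l : List Char) (q : Char) (i : Int) :
    pvScanB l (some q) i =
      if pvFind l q i = -1 then 0 else pvScanB l none (pvFind l q i + 1) := by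
  rw [pvScanB]
  rfl

theorem pvScanB_none_none (l : List Char) (i : Int)
    (hmin : PySem.List.min?
      (([pvFind l '\'' i, pvFind l '"' i, pvFind l '>' i]).filter (fun j => j != -1))
      (fun j => j) = none) :
    pvScanB l none i = 0 := by
  rw [pvScanB]
  split
  · rfl
  · next j heq => rw [hmin] at heq; cases heq

theorem pvScanB_none_some (l : List Char) (i : Int) (j : Int)
    (hmin : PySem.List.min?
      (([pvFind l '\'' i, pvFind l '"' i, pvFind l '>' i]).filter (fun j => j != -1))
      (fun j => j) = some j) :
    pvScanB l none i =
      (match PySem.List.pyGet? l j with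
       | none => 0
       | some ch => if ch = '>' then j else pvScanB l (some ch) (j + 1)) := by
  rw [pvScanB]
  split
  · next heq => rw [hmin] at heq; cases heq
  · next j' heq => rw [hmin] at heq; cases heq; rfl

-- A's scan does not change state while it crosses a block of uninteresting characters
theorem pvScanA_skip_quote (l : List Char) (q : Char) (r : Nat) (hr : r ≤ l.length) :
    ∀ (n i : Nat), r - i ≤ n → i ≤ r → (∀ k, i ≤ k → k < r → l[k]? ≠ some q) →
      pvScanA l (some q) (i : Int) = pvScanA l (some q) (r : Int) := by
  intro n
  induction n with
  | zero => intro i h1 h2 _; have : i = r := by omega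
            subst this; rfl
  | succ n ih =>
      intro i h1 h2 hmid
      rcases Nat.eq_or_lt_of_le h2 with rfl | hlt
      · rfl
      · have hi : i < l.length := by omega
        have hne : l[i] ≠ q := by
          intro hq; exact hmid i (le_refl i) hlt (by rw [List.getElem?_eq_getElem hi, hq])
        rw [pvScanA_lt_some l q i hi, if_neg hne]
        have : ((i : Int) + 1) = ((i + 1 : Nat) : Int) := by push_cast; ring
        rw [this]
        exact ih (i + 1) (by omega) (by omega) (fun k hk1 hk2 => hmid k (by omega) hk2)

theorem pvScanA_skip_none (l : List Char) (r : Nat) (hr : r ≤ l.length) :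
    ∀ (n i : Nat), r - i ≤ n → i ≤ r →
      (∀ k, i ≤ k → k < r →
        l[k]? ≠ some '\'' ∧ l[k]? ≠ some '"' ∧ l[k]? ≠ some '>') →
      pvScanA l none (i : Int) = pvScanA l none (r : Int) := by
  intro n
  induction n with
  | zero => intro i h1 h2 _; have : i = r := by omega
            subst this; rfl
  | succ n ih =>
      intro i h1 h2 hmid
      rcases Nat.eq_or_lt_of_le h2 with rfl | hlt
      · rfl
      · have hi : i < l.length := by omega
        obtain ⟨m1, m2, m3⟩ := hmid i (le_refl i) hlt
        rw [List.getElem?_eq_getElem hi] at m1 m2 m3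
        have e1 : l[i] ≠ '\'' := fun h => m1 (by rw [h])
        have e2 : l[i] ≠ '"' := fun h => m2 (by rw [h])
        have e3 : l[i] ≠ '>' := fun h => m3 (by rw [h])
        rw [pvScanA_lt_none l i hi, if_neg (by tauto), if_neg e3]
        have : ((i : Int) + 1) = ((i + 1 : Nat) : Int) := by push_cast; ring
        rw [this]
        exact ih (i + 1) (by omega) (by omega) (fun k hk1 hk2 => hmid k (by omega) hk2)

-- past the end of the string both loops fall into their exhausted branch
theorem pvScanB_ge (l : List Char) (q : Option Char) (i : Nat)
    (h : l.length ≤ i) : pvScanB l q (i : Int) = 0 := by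
  have hfind : ∀ c : Char, pvFind l c (i : Int) = -1 := by
    intro c
    rw [pvFind_natCast]
    by_contra hne
    obtain ⟨r, _, hir, hcr, _⟩ := (pvFindNat_spec l c i).2 hne
    have : r < l.length := (List.getElem?_eq_some_iff.mp hcr).1
    omega
  cases q with
  | some q => rw [pvScanB_some, if_pos (hfind q)]
  | none =>
      apply pvScanB_none_none
      simp [hfind]

theorem pvScan_eq (l : List Char) :
    ∀ (n : Nat) (i : Nat) (q : Option Char), l.length - i ≤ n →
      pvScanA l q (i : Int) = pvScanB l q (i : Int) := by
  intro n
  induction n with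
  | zero =>
      intro i q h
      rw [pvScanA_ge l q i (by omega), pvScanB_ge l q i (by omega)]
  | succ n ih =>
      intro i q hfuel
      by_cases hlen : l.length ≤ i
      · rw [pvScanA_ge l q i (by omega), pvScanB_ge l q i hlen]
      · cases q with
        | some c =>
            by_cases hf : pvFindNat l c i = -1
            · -- no closing quote at all: both fall off the end
              rw [pvScanA_skip_quote l c l.length (le_refl _) (l.length - i) i (by omega)
                    (by omega) (fun k hk1 _ => (pvFindNat_spec l c i).1 hf k hk1),
                  pvScanA_ge l (some c) l.length (le_refl _),
                  pvScanB_some, if_pos (by rw [pvFind_natCast]; exact hf)]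
            · obtain ⟨r, hr, hir, hcr, hmid⟩ := (pvFindNat_spec l c i).2 hf
              have hrlen : r < l.length := (List.getElem?_eq_some_iff.mp hcr).1
              have hrc : l[r] = c := (List.getElem?_eq_some_iff.mp hcr).2
              rw [pvScanA_skip_quote l c r hrlen.le (r - i) i (by omega) hir
                    (fun k hk1 hk2 => hmid k hk1 hk2),
                  pvScanA_lt_some l c r hrlen, if_pos hrc,
                  pvScanB_some, if_neg (by rw [pvFind_natCast]; omega),
                  pvFind_natCast, hr]
              have : ((r : Int) + 1) = ((r + 1 : Nat) : Int) := by push_cast; ring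
              rw [this]
              exact ih (r + 1) none (by omega)
        | none =>
            cases hmin : PySem.List.min?
                (([pvFind l '\'' (i : Int), pvFind l '"' (i : Int),
                   pvFind l '>' (i : Int)]).filter (fun j => j != -1))
                (fun j => j) with
            | none =>
                -- no quote and no '>' remain: both fall off the end
                have hall : ∀ c ∈ ['\'', '"', '>'], pvFindNat l c i = -1 := by
                  rw [PySem.List.min?_eq_none_iff, List.filter_eq_nil_iff] at hmin
                  intro c hc
                  simp only [List.mem_cons, List.not_mem_nil, or_false] at hc
                  have hmem : pvFind l c (i : Int) ∈
                      [pvFind l '\'' (i : Int), pvFind l '"' (i : Int),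
                       pvFind l '>' (i : Int)] := by
                    rcases hc with rfl | rfl | rfl <;> simp
                  have := hmin _ hmem
                  rw [pvFind_natCast] at this
                  simpa using this
                rw [pvScanA_skip_none l l.length (le_refl _) (l.length - i) i (by omega)
                      (by omega)
                      (fun k hk1 _ =>
                        ⟨(pvFindNat_spec l _ i).1 (hall _ (by simp)) k hk1,
                         (pvFindNat_spec l _ i).1 (hall _ (by simp)) k hk1,
                         (pvFindNat_spec l _ i).1 (hall _ (by simp)) k hk1⟩),
                    pvScanA_ge l none l.length (le_refl _),
                    pvScanB_none_none l (i : Int) hmin]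
            | some j =>
                have hjmem := PySem.List.min?_mem hmin
                have hjmin := PySem.List.min?_isMin hmin
                simp only [List.mem_filter, List.mem_cons, List.not_mem_nil, or_false,
                  bne_iff_ne, ne_eq] at hjmem
                obtain ⟨hj3, hjne⟩ := hjmem
                -- the found position, as a Nat, with its character
                have key : ∃ c₀, (c₀ = '\'' ∨ c₀ = '"' ∨ c₀ = '>') ∧
                    pvFind l c₀ (i : Int) = j := by
                  rcases hj3 with h | h | h
                  exacts [⟨'\'', Or.inl rfl, h.symm⟩, ⟨'"', Or.inr (Or.inl rfl), h.symm⟩,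
                    ⟨'>', Or.inr (Or.inr rfl), h.symm⟩]
                obtain ⟨c₀, hc₀, hjc₀⟩ := key
                rw [pvFind_natCast] at hjc₀
                obtain ⟨r, hr, hir, hcr, hmid⟩ :=
                  (pvFindNat_spec l c₀ i).2 (by rw [hjc₀]; exact hjne)
                have hjr : j = (r : Int) := by rw [← hjc₀, hr]
                have hrlen : r < l.length := (List.getElem?_eq_some_iff.mp hcr).1
                have hrc : l[r] = c₀ := (List.getElem?_eq_some_iff.mp hcr).2
                -- no significant character strictly before r
                have midall : ∀ k, i ≤ k → k < r →
                    l[k]? ≠ some '\'' ∧ l[k]? ≠ some '"' ∧ l[k]? ≠ some '>' := by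
                  intro k hk1 hk2
                  have gen : ∀ c : Char,
                      pvFind l c (i : Int) ∈
                        [pvFind l '\'' (i : Int), pvFind l '"' (i : Int),
                         pvFind l '>' (i : Int)] →
                      l[k]? ≠ some c := by
                    intro c hcmem hkc
                    have hne' : pvFindNat l c i ≠ -1 :=
                      fun hneg => (pvFindNat_spec l c i).1 hneg k hk1 hkc
                    obtain ⟨r', hr', hir', hcr', hmid'⟩ := (pvFindNat_spec l c i).2 hne'
                    have hr'k : r' ≤ k := by
                      by_contra hgt; exact hmid' k hk1 (by omega) hkc
                    have hjler' : j ≤ (r' : Int) := by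
                      have hm := hjmin (pvFind l c (i : Int))
                        (List.mem_filter.mpr ⟨hcmem,
                          by rw [pvFind_natCast, hr']; simp only [bne_iff_ne, ne_eq]; omega⟩)
                      rw [pvFind_natCast, hr'] at hm
                      exact hm
                    omega
                  exact ⟨gen _ (by simp), gen _ (by simp), gen _ (by simp)⟩
                have hget : PySem.List.pyGet? l ((r : Nat) : Int) = some c₀ := by
                  simp [PySem.List.pyGet?_natCast, hcr]
                rw [pvScanA_skip_none l r hrlen.le (r - i) i (by omega) hir midall,
                    pvScanA_lt_none l r hrlen, hrc,
                    pvScanB_none_some l (i : Int) j hmin, hjr, hget]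
                have hcast : ((r : Int) + 1) = ((r + 1 : Nat) : Int) := by push_cast; ring
                rcases hc₀ with rfl | rfl | rfl
                · rw [if_pos (by tauto)]
                  show pvScanA l (some '\'') ((r : Int) + 1) =
                    if '\'' = '>' then ((r : Nat) : Int)
                    else pvScanB l (some '\'') ((r : Int) + 1)
                  rw [if_neg (by decide), hcast]
                  exact ih (r + 1) (some '\'') (by omega)
                · rw [if_pos (by tauto)]
                  show pvScanA l (some '"') ((r : Int) + 1) =
                    if '"' = '>' then ((r : Nat) : Int)
                    else pvScanB l (some '"') ((r : Int) + 1)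
                  rw [if_neg (by decide), hcast]
                  exact ih (r + 1) (some '"') (by omega)
                · rw [if_neg (by decide), if_pos rfl]
                  show ((r : Nat) : Int) =
                    if '>' = '>' then ((r : Nat) : Int)
                    else pvScanB l (some '>') ((r : Int) + 1)
                  rw [if_pos rfl]

-- ===== VERDICT (by name: the statement is the Claim_ definition above) =====
theorem find_tag_end_spec : Claim_equal_find_tag_end := by
  intro text start _hdom hpre
  unfold Spec_find_tag_end find_tag_end find_tag_end_alt
  obtain ⟨hs, _⟩ := hpre
  have : start = ((start.toNat : Nat) : Int) := by omega
  rw [this]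
  exact pvScan_eq text.toList (text.toList.length) start.toNat none (by omega)
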